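-- pv_equiv track=rewrite | github.com/COSC-499-W2025/capstone-project-team-2 | src/core/ai_data_scrubbing.py | _clip_sentences_off_data
-- ===== SOURCE A (Python) =====
-- def _clip_sentences_off_data(data: list, tolerance=0, character=' ', clip_after_character=False) -> list:
--     '''
--     Iterates over data and returns all strings with text only until first space (or specified character)
--         Tolerance increases the amount of spaces before clipping
--
--     parameters:
--         data: list of strings
--         tolerance: defaults to 0. How many spaces/specified characters to include before clipping end off.
--         character: defaults to space. Can be changed to clip on different characters.
--         clip_after_character: default to false. When true, clips after first space/specified character instead of clipping the space/character.
--
--     returns: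
--         returns a list of strings from data with sentences clipped off
--     '''
--     clipped_data = list()
--     for string in data:
--         if not (isinstance(string, str)):  #If value isn't a string, it shouldn't be in the list
--             continue
--         space_count = 0
--         for i in range(0, len(string)):
--             if string[i] == character:
--                 space_count+=1
--             if space_count > tolerance: #once enough spaces are found, we clip the extra sentence off
--                 clipped_data.append(string[:i+int(clip_after_character == True)])
--                 break
--         if space_count <= tolerance:    #adds string if tolerance to clip not met
--             clipped_data.append(string)
--     return clipped_data
-- ===== SOURCE B (Python) =====
-- def _clip_sentences_off_data(data: list, tolerance=0, character=' ', clip_after_character=False) -> list: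
--     clipped = []
--     for s in data:
--         if not isinstance(s, str):  # non-strings don't belong in the list
--             continue
--         if len(character) == 1:
--             positions = [i for i, c in enumerate(s) if c == character]
--             if tolerance < len(positions):
--                 cut = positions[tolerance] + (1 if clip_after_character == True else 0)
--                 clipped.append(s[:cut])
--                 continue
--         clipped.append(s)
--     return clipped
-- ===== Notes on version B (the rewrite author's own statement) =====
-- stated objective: idiomatic
-- what changed: B replaces A's char-by-char counting loop with early break by a comprehension collecting all match positions per string and clipping directly at positions[tolerance], behind a single len(character)==1 guard.
-- outside the precondition, e.g. on _clip_sentences_off_data(['ab'], -1, ' ', False): A returns [''], B raises IndexError; on _clip_sentences_off_data(['a b'], -1, ' ', True): A returns ['a'], B returns ['a ']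
import Mathlib
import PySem

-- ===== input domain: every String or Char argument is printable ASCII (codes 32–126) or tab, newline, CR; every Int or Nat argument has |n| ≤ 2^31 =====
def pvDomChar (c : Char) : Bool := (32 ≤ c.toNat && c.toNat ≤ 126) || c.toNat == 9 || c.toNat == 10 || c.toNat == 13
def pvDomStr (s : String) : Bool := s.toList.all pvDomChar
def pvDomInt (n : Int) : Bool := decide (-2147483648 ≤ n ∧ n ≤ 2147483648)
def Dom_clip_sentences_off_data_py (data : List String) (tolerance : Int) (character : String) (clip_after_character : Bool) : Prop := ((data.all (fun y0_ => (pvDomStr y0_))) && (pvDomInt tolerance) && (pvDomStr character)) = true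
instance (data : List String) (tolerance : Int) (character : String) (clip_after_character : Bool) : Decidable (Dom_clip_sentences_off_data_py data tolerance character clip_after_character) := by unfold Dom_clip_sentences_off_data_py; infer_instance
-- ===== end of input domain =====

-- B collects all match positions per string with one comprehension and clips directly at
-- positions[tolerance], instead of A's counting scan with an early break (objective: idiomatic).


-- ===== PORT A =====
-- inner 'for i in range(0, len(string))' loop of A: scans the characters, counts matches
-- ('string[i] == character' is '[c] = character.toList'), breaks with the clip index once
-- the count exceeds tolerance; returns (break index if any, final count).
def pvAScan (cs : List Char) (ch : List Char) (i : Int) (count : Int) (tolerance : Int) :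
    Option Int × Int :=
  match cs with
  | [] => (none, count)
  | c :: rest =>
      let count' := if [c] = ch then count + 1 else count
      if count' > tolerance then (some i, count')
      else pvAScan rest ch (i + 1) count' tolerance

def clip_sentences_off_data_py (data : List String) (tolerance : Int) (character : String) (clip_after_character : Bool) : List String :=
  data.foldl (fun clipped_data s =>
    let r := pvAScan s.toList character.toList 0 0 tolerance
    let clipped_data :=
      match r.1 with
      | some i => clipped_data ++
          [String.mk (PySem.List.slice s.toList none
            (some (i + (if clip_after_character = true then 1 else 0))))]  -- string[:i+int(clip_after_character == True)]
      | none => clipped_data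
    if r.2 ≤ tolerance then clipped_data ++ [s] else clipped_data) []

-- ===== PORT B =====
-- Source B per string: positions = [i for i, c in enumerate(s) if c == character];
-- clip at positions[tolerance] when tolerance < len(positions).  The index
-- positions[tolerance] is in range under the guard whenever 0 ≤ tolerance (Pre_),
-- so it is ported with pyGetD.
def clip_sentences_off_data_py_alt (data : List String) (tolerance : Int) (character : String) (clip_after_character : Bool) : List String :=
  data.foldl (fun clipped s =>
    if PySem.Str.len character = 1 then
      let positions := ((PySem.List.enumerate s.toList 0).filter
        (fun p => [p.2] = character.toList)).map (fun p => p.1)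
      if tolerance < (positions.length : Int) then
        clipped ++ [String.mk (PySem.List.slice s.toList none
          (some (PySem.List.pyGetD positions tolerance 0 +
                 (if clip_after_character = true then 1 else 0))))]
      else clipped ++ [s]
    else clipped ++ [s]) []

-- ===== PRECONDITION & SPEC =====
-- Pre_ excludes negative tolerance: a negative match count is outside the function's natural
-- domain, and there A's values (clipping every non-empty string at index 0 and dropping empty
-- strings) are loop artefacts B's indexing does not reproduce (it may raise IndexError).
def Pre_clip_sentences_off_data_py (data : List String) (tolerance : Int) (character : String) (clip_after_character : Bool) : Prop :=
  0 ≤ tolerance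
instance (data : List String) (tolerance : Int) (character : String) (clip_after_character : Bool) : Decidable (Pre_clip_sentences_off_data_py data tolerance character clip_after_character) := by unfold Pre_clip_sentences_off_data_py; infer_instance
def pvWitness_clip_sentences_off_data_py : List String × Int × String × Bool :=
  (["hello world now", "nospace"], 1, " ", false)

def Spec_clip_sentences_off_data_py (data : List String) (tolerance : Int) (character : String) (clip_after_character : Bool) (out : List String) : Prop := out = clip_sentences_off_data_py_alt data tolerance character clip_after_character
instance (data : List String) (tolerance : Int) (character : String) (clip_after_character : Bool) (out : List String) : Decidable (Spec_clip_sentences_off_data_py data tolerance character clip_after_character out) := by unfold Spec_clip_sentences_off_data_py; infer_instance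

-- ===== CLAIM (what is proved, stated in full; the proofs are below) =====
def Claim_equal_clip_sentences_off_data_py : Prop := ∀ (data : List String) (tolerance : Int) (character : String) (clip_after_character : Bool), Dom_clip_sentences_off_data_py data tolerance character clip_after_character → Pre_clip_sentences_off_data_py data tolerance character clip_after_character → Spec_clip_sentences_off_data_py data tolerance character clip_after_character (clip_sentences_off_data_py data tolerance character clip_after_character)

-- ===== LEMMAS AND PROOFS =====

-- proof-side: the (offset) indices at which the predicate '[c] = ch' holds
def pvOcc (ch : List Char) : List Char → Int → List Int
  | [], _ => []
  | c :: rest, i =>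
      if [c] = ch then i :: pvOcc ch rest (i + 1) else pvOcc ch rest (i + 1)

theorem pvOcc_of_len_ne_one (ch : List Char) (h : ch.length ≠ 1) :
    ∀ (cs : List Char) (i : Int), pvOcc ch cs i = [] := by
  intro cs
  induction cs with
  | nil => intro i; rfl
  | cons c rest ih =>
      intro i
      have hne : ¬ ([c] = ch) := by
        intro he; exact h (by rw [← he]; rfl)
      simp [pvOcc, hne, ih]

theorem pvAScan_eq (ch : List Char) (tolerance : Int) :
    ∀ (cs : List Char) (i count : Int), count ≤ tolerance →
      pvAScan cs ch i count tolerance =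
        if tolerance - count < ((pvOcc ch cs i).length : Int)
        then (some ((pvOcc ch cs i).getD (tolerance - count).toNat 0), tolerance + 1)
        else (none, count + (pvOcc ch cs i).length) := by
  intro cs
  induction cs with
  | nil =>
      intro i count hc
      simp [pvAScan, pvOcc]
      omega
  | cons c rest ih =>
      intro i count hc
      by_cases hp : [c] = ch
      · by_cases hbreak : count + 1 > tolerance
        · have hct : count = tolerance := by omega
          simp [pvAScan, pvOcc, hp, hbreak, hct]
        · have h1 : count + 1 ≤ tolerance := by omega
          rw [show pvAScan (c :: rest) ch i count tolerance =
              pvAScan rest ch (i + 1) (count + 1) tolerance by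
            simp [pvAScan, hp, hbreak]]
          rw [ih (i + 1) (count + 1) h1]
          have hocc : pvOcc ch (c :: rest) i = i :: pvOcc ch rest (i + 1) := by
            simp [pvOcc, hp]
          rw [hocc]
          by_cases hlt : tolerance - (count + 1) < ((pvOcc ch rest (i + 1)).length : Int)
          · have hlt' : tolerance - count < (((i :: pvOcc ch rest (i + 1)).length : Nat) : Int) := by
              simp; omega
            simp only [if_pos hlt, if_pos hlt']
            have hk : (tolerance - count).toNat = (tolerance - (count + 1)).toNat + 1 := by omega
            simp [hk]
          · have hlt' : ¬ tolerance - count < (((i :: pvOcc ch rest (i + 1)).length : Nat) : Int) := by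
              simp; omega
            simp only [if_neg hlt, if_neg hlt']
            simp
            omega
      · rw [show pvAScan (c :: rest) ch i count tolerance =
            pvAScan rest ch (i + 1) count tolerance by
          simp [pvAScan, hp]; omega]
        rw [ih (i + 1) count hc]
        simp [pvOcc, hp]

theorem pvPositions_eq (ch : List Char) :
    ∀ (cs : List Char) (i : Int),
      ((PySem.List.enumerate cs i).filter (fun p => [p.2] = ch)).map (fun p => p.1) =
        pvOcc ch cs i := by
  intro cs
  induction cs with
  | nil => intro i; rfl
  | cons c rest ih =>
      intro i
      by_cases hp : [c] = ch
      · simp [PySem.List.enumerate_cons, List.filter, hp, pvOcc, ih]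
      · simp [PySem.List.enumerate_cons, List.filter, hp, pvOcc, ih]

-- one string handled equally by both per-element steps
theorem pvStep_eq (tolerance : Int) (character : String) (clip_after_character : Bool)
    (htol : 0 ≤ tolerance) (acc : List String) (s : String) :
    (let r := pvAScan s.toList character.toList 0 0 tolerance
     let clipped_data :=
       match r.1 with
       | some i => acc ++
           [String.mk (PySem.List.slice s.toList none
             (some (i + (if clip_after_character = true then 1 else 0))))]
       | none => acc
     if r.2 ≤ tolerance then clipped_data ++ [s] else clipped_data) =
    (if PySem.Str.len character = 1 then
      let positions := ((PySem.List.enumerate s.toList 0).filter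
        (fun p => [p.2] = character.toList)).map (fun p => p.1)
      if tolerance < (positions.length : Int) then
        acc ++ [String.mk (PySem.List.slice s.toList none
          (some (PySem.List.pyGetD positions tolerance 0 +
                 (if clip_after_character = true then 1 else 0))))]
      else acc ++ [s]
    else acc ++ [s]) := by
  rw [pvAScan_eq character.toList tolerance s.toList 0 0 htol]
  rw [pvPositions_eq character.toList s.toList 0]
  by_cases hlen : character.toList.length = 1
  · have hlen' : PySem.Str.len character = 1 := by
      simp [PySem.Str.len_eq, hlen]
    rw [if_pos hlen']
    by_cases hlt : tolerance < ((pvOcc character.toList s.toList 0).length : Int)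
    · have hlt0 : tolerance - 0 < ((pvOcc character.toList s.toList 0).length : Int) := by omega
      simp only [if_pos hlt, if_pos hlt0]
      have hno : ¬ (tolerance + 1 ≤ tolerance) := by omega
      simp only [hno, if_false]
      rw [PySem.List.pyGetD_of_nonneg (pvOcc character.toList s.toList 0) 0 htol]
      norm_num
    · have hlt0 : ¬ (tolerance - 0 < ((pvOcc character.toList s.toList 0).length : Int)) := by omega
      simp only [if_neg hlt, if_neg hlt0]
      have hle : ((pvOcc character.toList s.toList 0).length : Int) ≤ tolerance := by omega
      simp [hle]
  · have hlen' : ¬ (PySem.Str.len character = 1) := by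
      simp only [PySem.Str.len_eq, Nat.cast_eq_one]
      exact hlen
    rw [if_neg hlen']
    rw [pvOcc_of_len_ne_one character.toList hlen s.toList 0]
    simp only [List.length_nil, Nat.cast_zero]
    rw [if_neg (by omega : ¬ tolerance - 0 < (0 : Int))]
    simp [htol]

theorem pvFold_eq (tolerance : Int) (character : String) (clip_after_character : Bool)
    (htol : 0 ≤ tolerance) :
    ∀ (data : List String) (acc : List String),
      data.foldl (fun clipped_data s =>
        let r := pvAScan s.toList character.toList 0 0 tolerance
        let clipped_data :=
          match r.1 with
          | some i => clipped_data ++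
              [String.mk (PySem.List.slice s.toList none
                (some (i + (if clip_after_character = true then 1 else 0))))]
          | none => clipped_data
        if r.2 ≤ tolerance then clipped_data ++ [s] else clipped_data) acc =
      data.foldl (fun clipped s =>
        if PySem.Str.len character = 1 then
          let positions := ((PySem.List.enumerate s.toList 0).filter
            (fun p => [p.2] = character.toList)).map (fun p => p.1)
          if tolerance < (positions.length : Int) then
            clipped ++ [String.mk (PySem.List.slice s.toList none
              (some (PySem.List.pyGetD positions tolerance 0 +
                     (if clip_after_character = true then 1 else 0))))]
          else clipped ++ [s]
        else clipped ++ [s]) acc := by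
  intro data
  induction data with
  | nil => intro acc; rfl
  | cons s rest ih =>
      intro acc
      simp only [List.foldl_cons]
      rw [← pvStep_eq tolerance character clip_after_character htol acc s]
      exact ih _

-- ===== VERDICT (by name: the statement is the Claim_ definition above) =====
theorem clip_sentences_off_data_py_spec : Claim_equal_clip_sentences_off_data_py := by
  intro data tolerance character clip_after_character _hdom hpre
  unfold Spec_clip_sentences_off_data_py
  unfold clip_sentences_off_data_py clip_sentences_off_data_py_alt
  exact pvFold_eq tolerance character clip_after_character hpre data []
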